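-- pv_equiv track=rewrite | github.com/alexalemi/advent | 2019/py/p03.py | visit2
-- ===== SOURCE A (Python) =====
-- def visit2(path):
--     loc = (0, 0)
--     step = 0
--     visited = {}
--     for part in path.split(","):
--         if part[0] == "R":
--             for i in range(int(part[1:])):
--                 loc = (loc[0] + 1, loc[1])
--                 step += 1
--                 visited[loc] = step
--         elif part[0] == "L":
--             for i in range(int(part[1:])):
--                 loc = (loc[0] - 1, loc[1])
--                 step += 1
--                 visited[loc] = step
--         elif part[0] == "D":
--             for i in range(int(part[1:])):
--                 loc = (loc[0], loc[1] - 1)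
--                 step += 1
--                 visited[loc] = step
--         elif part[0] == "U":
--             for i in range(int(part[1:])):
--                 loc = (loc[0], loc[1] + 1)
--                 step += 1
--                 visited[loc] = step
--     return visited
-- ===== SOURCE B (Python) =====
-- _DELTAS = {"R": (1, 0), "L": (-1, 0), "D": (0, -1), "U": (0, 1)}
--
-- def visit2(path):
--     # flatten the path into one delta per step, scan to positions, build dict
--     deltas = []
--     for part in path.split(","):
--         d = _DELTAS.get(part[0])
--         if d is not None:
--             deltas.extend([d] * int(part[1:]))
--     positions = []
--     x = y = 0
--     for dx, dy in deltas:
--         x += dx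
--         y += dy
--         positions.append((x, y))
--     return {pos: step for step, pos in enumerate(positions, 1)}
-- ===== Notes on version B (the rewrite author's own statement) =====
-- stated objective: alternative
-- what changed: Replaces four copy-pasted stateful direction loops by a table-driven flatten-then-scan pipeline: each part is expanded to a flat list of unit deltas via a direction table, a single scan turns deltas into visited positions, and a dict comprehension over enumerate(positions, 1) builds the step map.
import Mathlib
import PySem

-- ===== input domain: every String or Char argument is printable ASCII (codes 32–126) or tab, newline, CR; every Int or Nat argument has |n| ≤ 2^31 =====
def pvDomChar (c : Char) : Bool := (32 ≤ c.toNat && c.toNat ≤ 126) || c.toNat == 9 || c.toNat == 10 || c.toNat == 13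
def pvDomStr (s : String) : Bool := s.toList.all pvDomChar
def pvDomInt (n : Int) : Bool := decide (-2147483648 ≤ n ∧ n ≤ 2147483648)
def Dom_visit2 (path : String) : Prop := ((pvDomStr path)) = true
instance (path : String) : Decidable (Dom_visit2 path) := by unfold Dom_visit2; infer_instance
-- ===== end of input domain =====

-- B replaces A's four copy-pasted direction loops by a table-driven
-- flatten-to-deltas / scan-to-positions / enumerate-to-dict pipeline (objective: alternative).

-- ===== PORT A =====
-- A's per-direction inner loops 'for i in range(int(part[1:])): loc = …; step += 1; visited[loc] = step'
def visit2LoopR : Nat → (Int × Int) → Int → PySem.Dict (Int × Int) Int → (Int × Int) × Int × PySem.Dict (Int × Int) Int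
  | 0, loc, step, visited => (loc, step, visited)
  | n + 1, loc, step, visited =>
      let loc' := (loc.1 + 1, loc.2)
      visit2LoopR n loc' (step + 1) (visited.insert loc' (step + 1))

def visit2LoopL : Nat → (Int × Int) → Int → PySem.Dict (Int × Int) Int → (Int × Int) × Int × PySem.Dict (Int × Int) Int
  | 0, loc, step, visited => (loc, step, visited)
  | n + 1, loc, step, visited =>
      let loc' := (loc.1 - 1, loc.2)
      visit2LoopL n loc' (step + 1) (visited.insert loc' (step + 1))

def visit2LoopD : Nat → (Int × Int) → Int → PySem.Dict (Int × Int) Int → (Int × Int) × Int × PySem.Dict (Int × Int) Int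
  | 0, loc, step, visited => (loc, step, visited)
  | n + 1, loc, step, visited =>
      let loc' := (loc.1, loc.2 - 1)
      visit2LoopD n loc' (step + 1) (visited.insert loc' (step + 1))

def visit2LoopU : Nat → (Int × Int) → Int → PySem.Dict (Int × Int) Int → (Int × Int) × Int × PySem.Dict (Int × Int) Int
  | 0, loc, step, visited => (loc, step, visited)
  | n + 1, loc, step, visited =>
      let loc' := (loc.1, loc.2 + 1)
      visit2LoopU n loc' (step + 1) (visited.insert loc' (step + 1))

-- the body of 'for part in path.split(",")'; on part[0] IndexError / int() ValueError
-- A raises — those inputs are outside Pre_visit2 and the port keeps the state unchanged there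
def visit2Fold (st : (Int × Int) × Int × PySem.Dict (Int × Int) Int) (part : String) :
    (Int × Int) × Int × PySem.Dict (Int × Int) Int :=
  match PySem.Str.pyGet? part 0 with
  | none => st
  | some c =>
    if c = 'R' then
      match PySem.Int.ofStr? (PySem.Str.slice part (some 1) none) with
      | none => st
      | some n => visit2LoopR n.toNat st.1 st.2.1 st.2.2
    else if c = 'L' then
      match PySem.Int.ofStr? (PySem.Str.slice part (some 1) none) with
      | none => st
      | some n => visit2LoopL n.toNat st.1 st.2.1 st.2.2
    else if c = 'D' then
      match PySem.Int.ofStr? (PySem.Str.slice part (some 1) none) with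
      | none => st
      | some n => visit2LoopD n.toNat st.1 st.2.1 st.2.2
    else if c = 'U' then
      match PySem.Int.ofStr? (PySem.Str.slice part (some 1) none) with
      | none => st
      | some n => visit2LoopU n.toNat st.1 st.2.1 st.2.2
    else st

def visit2 (path : String) : List (Int × Int × Int) :=
  let fin := ((PySem.Str.split? path ",").getD []).foldl visit2Fold (((0 : Int), (0 : Int)), (0 : Int), PySem.Dict.empty)
  fin.2.2.items.map (fun p => (p.1.1, p.1.2, p.2))

-- ===== PORT B =====
def visit2Deltas : PySem.Dict Char (Int × Int) :=
  PySem.Dict.ofList [('R', (1, 0)), ('L', (-1, 0)), ('D', (0, -1)), ('U', (0, 1))]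

def visit2_alt (path : String) : List (Int × Int × Int) :=
  -- deltas: one unit vector per step, table-driven
  let deltas : List (Int × Int) := ((PySem.Str.split? path ",").getD []).foldl
    (fun acc part =>
      match PySem.Str.pyGet? part 0 with
      | none => acc
      | some c =>
        match visit2Deltas.get? c with
        | none => acc
        | some d =>
            acc ++ List.replicate ((PySem.Int.ofStr? (PySem.Str.slice part (some 1) none)).getD 0).toNat d) []
  -- positions: running sum of deltas
  let positions := (deltas.foldl
    (fun (st : (Int × Int) × List (Int × Int)) d =>
      let p := (st.1.1 + d.1, st.1.2 + d.2)
      (p, st.2 ++ [p])) (((0 : Int), (0 : Int)), [])).2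
  -- {pos: step for step, pos in enumerate(positions, 1)}
  let visited := (PySem.List.enumerate positions 1).foldl
    (fun (d : PySem.Dict (Int × Int) Int) p => d.insert p.2 p.1) PySem.Dict.empty
  visited.items.map (fun p => (p.1.1, p.1.2, p.2))

-- ===== PRECONDITION & SPEC =====
-- Pre_ excludes exactly the inputs where A raises: an empty comma-part (IndexError on part[0]),
-- or a part starting with R/L/D/U whose remainder int() cannot parse (ValueError); B raises there too.
def Pre_visit2 (path : String) : Prop :=
  ((PySem.Str.split? path ",").getD []).all (fun p =>
    !p.toList.isEmpty &&
    (PySem.Str.pyGet? p 0).all (fun c =>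
      !(c == 'R' || c == 'L' || c == 'D' || c == 'U') ||
      (PySem.Int.ofStr? (PySem.Str.slice p (some 1) none)).isSome)) = true

instance (path : String) : Decidable (Pre_visit2 path) := by unfold Pre_visit2; infer_instance

def pvWitness_visit2 : String := "R8,U5,L5,D3"

def Spec_visit2 (path : String) (out : List (Int × Int × Int)) : Prop := out = visit2_alt path
instance (path : String) (out : List (Int × Int × Int)) : Decidable (Spec_visit2 path out) := by
  unfold Spec_visit2; infer_instance

-- ===== CLAIM (what is proved, stated in full; the proofs are below) =====
def Claim_equal_visit2 : Prop := ∀ (path : String), Dom_visit2 path → Pre_visit2 path → Spec_visit2 path (visit2 path)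

-- ===== LEMMAS AND PROOFS =====

-- the one-delta step both programs perform
def visit2Step (st : (Int × Int) × Int × PySem.Dict (Int × Int) Int) (d : Int × Int) :
    (Int × Int) × Int × PySem.Dict (Int × Int) Int :=
  let loc' := (st.1.1 + d.1, st.1.2 + d.2)
  (loc', st.2.1 + 1, st.2.2.insert loc' (st.2.1 + 1))

-- the deltas B emits for one part
def visit2PartDeltas (part : String) : List (Int × Int) :=
  match PySem.Str.pyGet? part 0 with
  | none => []
  | some c =>
    match visit2Deltas.get? c with
    | none => []
    | some d => List.replicate ((PySem.Int.ofStr? (PySem.Str.slice part (some 1) none)).getD 0).toNat d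

-- successive positions of a delta walk
def visit2Positions : List (Int × Int) → (Int × Int) → List (Int × Int)
  | [], _ => []
  | d :: ds, loc =>
      let p := (loc.1 + d.1, loc.2 + d.2)
      p :: visit2Positions ds p

theorem visit2LoopR_eq (n : Nat) (loc : Int × Int) (step : Int) (v : PySem.Dict (Int × Int) Int) :
    visit2LoopR n loc step v = (List.replicate n ((1 : Int), (0 : Int))).foldl visit2Step (loc, step, v) := by
  induction n generalizing loc step v with
  | zero => rfl
  | succ n ih => simp [visit2LoopR, List.replicate_succ, List.foldl_cons, ih, visit2Step]

theorem visit2LoopL_eq (n : Nat) (loc : Int × Int) (step : Int) (v : PySem.Dict (Int × Int) Int) :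
    visit2LoopL n loc step v = (List.replicate n ((-1 : Int), (0 : Int))).foldl visit2Step (loc, step, v) := by
  induction n generalizing loc step v with
  | zero => rfl
  | succ n ih =>
    simp [visit2LoopL, List.replicate_succ, List.foldl_cons, ih, visit2Step, sub_eq_add_neg]

theorem visit2LoopD_eq (n : Nat) (loc : Int × Int) (step : Int) (v : PySem.Dict (Int × Int) Int) :
    visit2LoopD n loc step v = (List.replicate n ((0 : Int), (-1 : Int))).foldl visit2Step (loc, step, v) := by
  induction n generalizing loc step v with
  | zero => rfl
  | succ n ih =>
    simp [visit2LoopD, List.replicate_succ, List.foldl_cons, ih, visit2Step, sub_eq_add_neg]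

theorem visit2LoopU_eq (n : Nat) (loc : Int × Int) (step : Int) (v : PySem.Dict (Int × Int) Int) :
    visit2LoopU n loc step v = (List.replicate n ((0 : Int), (1 : Int))).foldl visit2Step (loc, step, v) := by
  induction n generalizing loc step v with
  | zero => rfl
  | succ n ih => simp [visit2LoopU, List.replicate_succ, List.foldl_cons, ih, visit2Step]

theorem visit2Deltas_get_none (c : Char) (hR : c ≠ 'R') (hL : c ≠ 'L') (hD : c ≠ 'D') (hU : c ≠ 'U') :
    visit2Deltas.get? c = none := by
  have hm : visit2Deltas =
      PySem.Dict.mk [('R', ((1 : Int), (0 : Int))), ('L', (-1, 0)), ('D', (0, -1)), ('U', (0, 1))] := by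
    decide
  rw [hm]
  simp [Ne.symm hR, Ne.symm hL, Ne.symm hD, Ne.symm hU, PySem.Dict.get?]

-- one part of A's loop equals running visit2Step over B's deltas for that part
theorem visit2Fold_eq (part : String)
    (hp : (!part.toList.isEmpty &&
      (PySem.Str.pyGet? part 0).all (fun c =>
        !(c == 'R' || c == 'L' || c == 'D' || c == 'U') ||
        (PySem.Int.ofStr? (PySem.Str.slice part (some 1) none)).isSome)) = true)
    (st : (Int × Int) × Int × PySem.Dict (Int × Int) Int) :
    visit2Fold st part = (visit2PartDeltas part).foldl visit2Step st := by
  obtain ⟨hne, hall⟩ := (Bool.and_eq_true _ _).mp hp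
  unfold visit2Fold visit2PartDeltas
  cases hc : PySem.Str.pyGet? part 0 with
  | none => rfl
  | some c =>
    rw [hc, Option.all_some] at hall
    have hnum' : (c = 'R' ∨ c = 'L' ∨ c = 'D' ∨ c = 'U') →
        (PySem.Int.ofStr? (PySem.Str.slice part (some 1) none)).isSome = true := by
      intro h
      rcases (Bool.or_eq_true _ _).mp hall with h' | h'
      · exfalso; rcases h with h | h | h | h <;> simp [h] at h'
      · exact h'

    by_cases hR : c = 'R'
    · obtain ⟨n, hn⟩ := Option.isSome_iff_exists.mp (hnum' (Or.inl hR))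
      have hd : visit2Deltas.get? 'R' = some ((1 : Int), (0 : Int)) := by decide
      simp [hR, hd, hn, visit2LoopR_eq]
    · by_cases hL : c = 'L'
      · obtain ⟨n, hn⟩ := Option.isSome_iff_exists.mp (hnum' (Or.inr (Or.inl hL)))
        have hd : visit2Deltas.get? 'L' = some ((-1 : Int), (0 : Int)) := by decide
        simp [hL, hd, hn, visit2LoopL_eq]
      · by_cases hD : c = 'D'
        · obtain ⟨n, hn⟩ := Option.isSome_iff_exists.mp (hnum' (Or.inr (Or.inr (Or.inl hD))))
          have hd : visit2Deltas.get? 'D' = some ((0 : Int), (-1 : Int)) := by decide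
          simp [hD, hd, hn, visit2LoopD_eq]
        · by_cases hU : c = 'U'
          · obtain ⟨n, hn⟩ := Option.isSome_iff_exists.mp (hnum' (Or.inr (Or.inr (Or.inr hU))))
            have hd : visit2Deltas.get? 'U' = some ((0 : Int), (1 : Int)) := by decide
            simp [hU, hd, hn, visit2LoopU_eq]
          · have hd : visit2Deltas.get? c = none := visit2Deltas_get_none c hR hL hD hU
            simp [hR, hL, hD, hU, hd]

-- A's whole loop over the parts = visit2Step over the flattened delta list
theorem visit2A_run (parts : List String)
    (hp : ∀ p ∈ parts, (!p.toList.isEmpty &&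
      (PySem.Str.pyGet? p 0).all (fun c =>
        !(c == 'R' || c == 'L' || c == 'D' || c == 'U') ||
        (PySem.Int.ofStr? (PySem.Str.slice p (some 1) none)).isSome)) = true)
    (st : (Int × Int) × Int × PySem.Dict (Int × Int) Int) :
    parts.foldl visit2Fold st = (parts.flatMap visit2PartDeltas).foldl visit2Step st := by
  induction parts generalizing st with
  | nil => rfl
  | cons p ps ih =>
    simp only [List.foldl_cons, List.flatMap_cons, List.foldl_append]
    rw [visit2Fold_eq p (hp p (by simp)), ih (fun q hq => hp q (by simp [hq]))]

-- B's per-part extend step, pointwise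
theorem visit2PartExtend (acc : List (Int × Int)) (part : String) :
    (match PySem.Str.pyGet? part 0 with
     | none => acc
     | some c =>
       match visit2Deltas.get? c with
       | none => acc
       | some d =>
           acc ++ List.replicate ((PySem.Int.ofStr? (PySem.Str.slice part (some 1) none)).getD 0).toNat d)
    = acc ++ visit2PartDeltas part := by
  unfold visit2PartDeltas
  cases PySem.Str.pyGet? part 0 with
  | none => simp
  | some c => rcases hd : visit2Deltas.get? c with _ | d <;> simp [hd]

-- B's position loop produces visit2Positions
theorem visit2B_positions (deltas : List (Int × Int)) (loc : Int × Int) (acc : List (Int × Int)) :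
    (deltas.foldl
      (fun (st : (Int × Int) × List (Int × Int)) d =>
        ((st.1.1 + d.1, st.1.2 + d.2), st.2 ++ [(st.1.1 + d.1, st.1.2 + d.2)])) (loc, acc)).2
    = acc ++ visit2Positions deltas loc := by
  induction deltas generalizing loc acc with
  | nil => simp [visit2Positions]
  | cons d ds ih => simp [visit2Positions, List.foldl_cons, ih]

-- B's dict of enumerated positions = the dict threaded by visit2Step
theorem visit2_dict_eq (deltas : List (Int × Int)) (loc : Int × Int) (step : Int)
    (v : PySem.Dict (Int × Int) Int) :
    (PySem.List.enumerate (visit2Positions deltas loc) (step + 1)).foldl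
      (fun (d : PySem.Dict (Int × Int) Int) p => d.insert p.2 p.1) v
    = (deltas.foldl visit2Step (loc, step, v)).2.2 := by
  induction deltas generalizing loc step v with
  | nil => simp [visit2Positions, PySem.List.enumerate_nil]
  | cons d ds ih =>
    simp only [visit2Positions, PySem.List.enumerate_cons, List.foldl_cons]
    rw [ih]
    rfl

theorem visit2_dict_eq' (deltas : List (Int × Int)) (v : PySem.Dict (Int × Int) Int) :
    (PySem.List.enumerate (visit2Positions deltas ((0 : Int), (0 : Int))) 1).foldl
      (fun (d : PySem.Dict (Int × Int) Int) p => d.insert p.2 p.1) v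
    = (deltas.foldl visit2Step (((0 : Int), (0 : Int)), (0 : Int), v)).2.2 := by
  have h := visit2_dict_eq deltas ((0 : Int), (0 : Int)) 0 v
  norm_num at h
  exact h

-- ===== VERDICT (by name: the statement is the Claim_ definition above) =====
theorem visit2_spec : Claim_equal_visit2 := by
  intro path _hdom hpre
  unfold Spec_visit2
  simp only [visit2, visit2_alt]
  rw [visit2A_run ((PySem.Str.split? path ",").getD []) (List.all_eq_true.mp hpre)]
  simp only [visit2PartExtend]
  rw [PySem.List.foldl_append_eq_flatMap, List.nil_append, visit2B_positions, List.nil_append,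
      visit2_dict_eq']
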